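-- pv_equiv track=rewrite | github.com/MissionWAR/Merge-Blocklists | scripts/validate.py | _validate_supported_modifiers
-- ===== SOURCE A (Python) =====
-- SUPPORTED_MODIFIERS = frozenset({
--     "important",   # Priority control
--     "ctag",        # Client tag filtering
--     "dnstype",     # DNS record type
--     "dnsrewrite",  # Custom DNS responses
--     "denyallow",   # Exception domains
--     "badfilter",   # Disable another filter
--     "client",      # Client-specific rules
-- })
--
-- LIMITING_MODIFIERS = frozenset({"denyallow", "badfilter", "client"})
--
-- def _validate_supported_modifiers(
--     options: list[dict[str, str | None]] | None, stats: dict[str, int]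
-- ) -> tuple[bool, bool]:
--     """
--     Validate modifiers. Returns (is_valid, has_limiting_modifier).
--     """
--     has_limit_modifier = False
--     if not options:
--         return True, has_limit_modifier
--
--     for opt in options:
--         name = opt["name"]
--         if name not in SUPPORTED_MODIFIERS:
--             stats["removed_bad_modifier"] += 1
--             return False, False
--         if name in LIMITING_MODIFIERS:
--             has_limit_modifier = True
--     return True, has_limit_modifier
-- ===== SOURCE B (Python) =====
-- SUPPORTED_MODIFIERS = frozenset({
--     "important",
--     "ctag",
--     "dnstype",
--     "dnsrewrite",
--     "denyallow",
--     "badfilter",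
--     "client",
-- })
--
-- LIMITING_MODIFIERS = frozenset({"denyallow", "badfilter", "client"})
--
--
-- def _validate_supported_modifiers(options, stats):
--     """Validate modifiers. Returns (is_valid, has_limiting_modifier)."""
--     if not options:
--         return True, False
--     if any(opt["name"] not in SUPPORTED_MODIFIERS for opt in options):
--         stats["removed_bad_modifier"] += 1
--         return False, False
--     return True, any(opt["name"] in LIMITING_MODIFIERS for opt in options)
-- ===== Notes on version B (the rewrite author's own statement) =====
-- stated objective: idiomatic
-- what changed: Replaces A's single accumulating loop (flag variable, mid-loop early return) with two short-circuiting any() membership scans: one for an unsupported name, one for a limiting name.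
import Mathlib
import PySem

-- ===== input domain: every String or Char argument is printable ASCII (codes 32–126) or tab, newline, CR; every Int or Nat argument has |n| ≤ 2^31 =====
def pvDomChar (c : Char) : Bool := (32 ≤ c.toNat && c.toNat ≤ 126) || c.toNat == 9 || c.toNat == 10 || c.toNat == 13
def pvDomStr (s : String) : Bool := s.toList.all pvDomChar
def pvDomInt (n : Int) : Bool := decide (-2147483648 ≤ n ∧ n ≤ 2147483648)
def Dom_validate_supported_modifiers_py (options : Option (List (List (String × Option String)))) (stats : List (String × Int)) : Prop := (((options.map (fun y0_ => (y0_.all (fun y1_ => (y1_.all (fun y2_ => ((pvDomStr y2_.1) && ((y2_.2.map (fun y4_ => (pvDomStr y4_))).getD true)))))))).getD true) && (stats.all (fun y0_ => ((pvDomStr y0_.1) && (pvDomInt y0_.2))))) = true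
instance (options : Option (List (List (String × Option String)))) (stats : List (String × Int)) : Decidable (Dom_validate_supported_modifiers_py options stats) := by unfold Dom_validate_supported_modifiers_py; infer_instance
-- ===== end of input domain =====

-- B replaces A's single accumulating loop with two short-circuiting any() membership scans (idiomatic).
-- Both Pythons mutate stats["removed_bad_modifier"] in place on an unsupported name; the equivalence
-- proved here is about the RETURN value only (both perform the same mutation).

-- Shared module constants (frozensets of the Python module, as distinct-element lists).
def pvSupportedModifiers : List String :=
  ["important", "ctag", "dnstype", "dnsrewrite", "denyallow", "badfilter", "client"]
def pvLimitingModifiers : List String := ["denyallow", "badfilter", "client"]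

-- opt["name"] on the association list (first match); default `none` stands in for the KeyError
-- case, which Pre_ excludes (Python None itself is `some` of nothing: the value `none : Option String`
-- is the Python value None stored under "name"; a missing key is ALSO mapped to `none` here, exact on Pre_).
def pvOptName (opt : List (String × Option String)) : Option String :=
  ((opt.find? (fun p => p.1 == "name")).map (·.2)).getD none

-- `name in SUPPORTED_MODIFIERS` / `... in LIMITING_MODIFIERS` (Python None is in neither set).
def pvNameSupported (n : Option String) : Bool :=
  match n with
  | some s => pvSupportedModifiers.contains s
  | none => false
def pvNameLimiting (n : Option String) : Bool :=
  match n with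
  | some s => pvLimitingModifiers.contains s
  | none => false

-- ===== PORT A =====
-- A's for-loop over options with the accumulating has_limit_modifier flag; the stats mutation
-- does not affect the return value, so the (False, False) early return is kept as-is.
def pvLoopA : List (List (String × Option String)) → Bool → Bool × Bool
  | [], has => (true, has)
  | opt :: rest, has =>
    let name := pvOptName opt
    if ¬ pvNameSupported name then (false, false)
    else pvLoopA rest (if pvNameLimiting name then true else has)

def validate_supported_modifiers_py (options : Option (List (List (String × Option String)))) (stats : List (String × Int)) : Bool × Bool :=
  match options with
  | none => (true, false)
  | some opts => if opts = [] then (true, false) else pvLoopA opts false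

-- ===== PORT B =====
-- Two lazy any() scans: unsupported-name scan, then limiting-name scan.
def validate_supported_modifiers_py_alt (options : Option (List (List (String × Option String)))) (stats : List (String × Int)) : Bool × Bool :=
  match options with
  | none => (true, false)
  | some opts =>
    if opts = [] then (true, false)
    else if opts.any (fun opt => ¬ pvNameSupported (pvOptName opt)) then (false, false)
    else (true, opts.any (fun opt => pvNameLimiting (pvOptName opt)))

-- ===== PRECONDITION & SPEC =====
-- Pre_ excludes the KeyError inputs: some option dict without a "name" key, or an unsupported name
-- present while stats lacks "removed_bad_modifier". This is slightly wider than the exact raise set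
-- (A returns (False, False) when the nameless dict comes only after the first unsupported one); see cites.
def Pre_validate_supported_modifiers_py (options : Option (List (List (String × Option String)))) (stats : List (String × Int)) : Prop :=
  (∀ opt ∈ options.getD [], (opt.find? (fun p => p.1 == "name")).isSome) ∧
  ((∃ opt ∈ options.getD [], ¬ pvNameSupported (pvOptName opt)) →
    (stats.find? (fun p => p.1 == "removed_bad_modifier")).isSome)
instance (options : Option (List (List (String × Option String)))) (stats : List (String × Int)) : Decidable (Pre_validate_supported_modifiers_py options stats) := by unfold Pre_validate_supported_modifiers_py; infer_instance

def pvWitness_validate_supported_modifiers_py : (Option (List (List (String × Option String)))) × (List (String × Int)) :=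
  (some [[("name", some "client")], [("name", some "important")]], [("removed_bad_modifier", 0)])

def Spec_validate_supported_modifiers_py (options : Option (List (List (String × Option String)))) (stats : List (String × Int)) (out : Bool × Bool) : Prop := out = validate_supported_modifiers_py_alt options stats
instance (options : Option (List (List (String × Option String)))) (stats : List (String × Int)) (out : Bool × Bool) : Decidable (Spec_validate_supported_modifiers_py options stats out) := by unfold Spec_validate_supported_modifiers_py; infer_instance

-- ===== CLAIM (what is proved, stated in full; the proofs are below) =====
def Claim_equal_validate_supported_modifiers_py : Prop := ∀ (options : Option (List (List (String × Option String)))) (stats : List (String × Int)), Dom_validate_supported_modifiers_py options stats → Pre_validate_supported_modifiers_py options stats → Spec_validate_supported_modifiers_py options stats (validate_supported_modifiers_py options stats)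

-- ===== LEMMAS AND PROOFS =====
-- A's loop equals the two any-scans, for every flag value (no Pre_ needed: both ports
-- totalise the missing-"name" case the same way).
theorem pvLoopA_eq_scans (opts : List (List (String × Option String))) (has : Bool) :
    pvLoopA opts has =
      (if opts.any (fun opt => ¬ pvNameSupported (pvOptName opt)) then (false, false)
       else (true, has || opts.any (fun opt => pvNameLimiting (pvOptName opt)))) := by
  induction opts generalizing has with
  | nil => simp [pvLoopA]
  | cons opt rest ih =>
    by_cases hsup : pvNameSupported (pvOptName opt)
    · rw [pvLoopA]
      simp only [hsup, not_true_eq_false, if_false, ih, List.any_cons]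
      cases hl : pvNameLimiting (pvOptName opt) <;>
        cases hbad : rest.any (fun opt => ¬ pvNameSupported (pvOptName opt)) <;>
          simp
    · rw [pvLoopA]
      simp [hsup]

-- ===== VERDICT (by name: the statement is the Claim_ definition above) =====
theorem validate_supported_modifiers_py_spec : Claim_equal_validate_supported_modifiers_py := by
  intro options stats _ _
  unfold Spec_validate_supported_modifiers_py validate_supported_modifiers_py validate_supported_modifiers_py_alt
  cases options with
  | none => rfl
  | some opts =>
    by_cases h : opts = []
    · simp [h]
    · simp [h, pvLoopA_eq_scans]
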